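-- pv_equiv track=rewrite | github.com/mathias-e-k/advent-of-code-solutions | 2023/day14.py | tilt_west
-- ===== SOURCE A (Python) =====
-- def tilt_west(puzzle):
--     puzzle = [list(line) for line in puzzle]
--     for i, line in enumerate(puzzle):
--         open_space = 0
--         for j, c in enumerate(line):
--             if c == "O":
--                 puzzle[i][j] = "."
--                 puzzle[i][open_space] = "O"
--                 open_space += 1
--             if c == "#":
--                 open_space = j + 1
--     puzzle = ["".join(line) for line in puzzle]
--     return puzzle
-- ===== SOURCE B (Python) =====
-- def tilt_west(puzzle):
--     out = []
--     for line in puzzle: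
--         segments = []
--         for seg in line.split('#'):
--             k = seg.count('O')
--             segments.append('O' * k + seg[k:].replace('O', '.'))
--         out.append('#'.join(segments))
--     return out
-- ===== Notes on version B (the rewrite author's own statement) =====
-- stated objective: idiomatic
-- what changed: Replaces A's in-place char-array mutation with a running write-pointer by splitting each row on '#' into segments and rebuilding each segment as 'O'*k + seg[k:].replace('O','.') (k = seg.count('O')), rejoined with '#'.
import Mathlib
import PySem

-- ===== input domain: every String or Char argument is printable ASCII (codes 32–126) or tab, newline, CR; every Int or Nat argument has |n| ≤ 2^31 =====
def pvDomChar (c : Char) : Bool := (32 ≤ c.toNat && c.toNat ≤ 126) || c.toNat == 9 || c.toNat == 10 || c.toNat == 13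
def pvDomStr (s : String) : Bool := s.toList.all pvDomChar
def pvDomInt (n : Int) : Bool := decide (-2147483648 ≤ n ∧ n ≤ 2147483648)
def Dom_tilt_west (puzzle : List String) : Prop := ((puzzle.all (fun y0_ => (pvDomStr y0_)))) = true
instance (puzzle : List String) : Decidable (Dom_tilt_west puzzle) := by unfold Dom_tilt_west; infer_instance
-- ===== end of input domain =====

-- B rebuilds each row by splitting it on '#' into segments instead of A's in-place writes
-- through a running pointer (objective: idiomatic). Equivalence is about the return value
-- (A mutates only a local copy of its input).

-- ===== PORT A =====
-- A's inner loop body. Python's `for j, c in enumerate(line)` reads each index before any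
-- write at that index can happen (all writes go to positions ≤ j), so folding over the
-- enumeration of the ORIGINAL row is exact.
def stepA (st : List Char × Int) (jc : Int × Char) : List Char × Int :=
  let st1 := if jc.2 = 'O'
    then (PySem.List.pySetD (PySem.List.pySetD st.1 jc.1 '.') st.2 'O', st.2 + 1)
    else st
  if jc.2 = '#' then (st1.1, jc.1 + 1) else st1

def tilt_west (puzzle : List String) : List String :=
  let grid := puzzle.map (fun line => line.toList)
  let grid2 := grid.map (fun line =>
    ((PySem.List.enumerate line 0).foldl stepA (line, 0)).1)
  grid2.map (fun line => String.ofList (PySem.Chars.join [] (line.map (fun c => [c]))))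

-- ===== PORT B =====
def tilt_west_alt (puzzle : List String) : List String :=
  puzzle.map (fun line =>
    let segments := (PySem.Chars.splitOn line.toList ['#']).map (fun seg =>
      let k := PySem.Chars.count seg ['O']
      List.replicate k 'O' ++
        PySem.Chars.replace (PySem.Chars.slice seg (some (k : Int)) none) ['O'] ['.'])
    String.ofList (PySem.Chars.join ['#'] segments))

-- ===== PRECONDITION & SPEC =====
def Spec_tilt_west (puzzle : List String) (out : List String) : Prop := out = tilt_west_alt puzzle
instance (puzzle : List String) (out : List String) : Decidable (Spec_tilt_west puzzle out) := by unfold Spec_tilt_west; infer_instance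

-- ===== CLAIM (what is proved, stated in full; the proofs are below) =====
def Claim_equal_tilt_west : Prop := ∀ (puzzle : List String), Dom_tilt_west puzzle → Spec_tilt_west puzzle (tilt_west puzzle)

-- ===== LEMMAS AND PROOFS =====

-- `c if c ≠ 'O' else '.'` — what packing leaves at a non-rock position
def pvSub (c : Char) : Char := if c = 'O' then '.' else c

-- the value one '#'-free segment ends up with
def pvSegOut (s : List Char) : List Char :=
  List.replicate (s.count 'O') 'O' ++ (s.drop (s.count 'O')).map pvSub

-- B's row value, on chars
def pvRow (cs : List Char) : List Char :=
  PySem.Chars.join ['#'] ((PySem.Chars.splitOn cs ['#']).map pvSegOut)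

-- the evolving content of the current segment during A's scan:
-- m = already-scanned non-'O' tail (behind the 'O'-block), second arg = chars still to scan
def pvG (m : List Char) : List Char → List Char
  | [] => m
  | c :: s =>
    if c = 'O' then
      match m with
      | [] => 'O' :: pvG [] s
      | _ :: mt => 'O' :: pvG (mt ++ ['.']) s
    else pvG (m ++ [c]) s

-- ---- small list facts ----
lemma set_at_prefix {α : Type} (u v : List α) (i : Nat) (x : α) :
    (u ++ v).set (u.length + i) x = u ++ v.set i x := by
  rw [List.set_append]
  simp

lemma set_at_len {α : Type} (w : List α) (v : α) (r : List α) (x : α) :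
    (w ++ v :: r).set w.length x = w ++ x :: r := by
  have h := set_at_prefix w (v :: r) 0 x
  simpa using h

lemma isPrefixOf_single_true (a : Char) (rest : List Char) :
    ([a].isPrefixOf (a :: rest)) = true := by
  simp [List.isPrefixOf]

lemma isPrefixOf_single_false (a c : Char) (rest : List Char) (hc : c ≠ a) :
    ([a].isPrefixOf (c :: rest)) = false := by
  simp [List.isPrefixOf]
  exact fun h => hc h.symm

-- ---- stepA in closed form ----
lemma stepA_O (arr : List Char) (os j : Int) :
    stepA (arr, os) (j, 'O')
      = (PySem.List.pySetD (PySem.List.pySetD arr j '.') os 'O', os + 1) := by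
  simp [stepA]

lemma stepA_hash (arr : List Char) (os j : Int) :
    stepA (arr, os) (j, '#') = (arr, j + 1) := by
  simp [stepA]

lemma stepA_other (arr : List Char) (os j : Int) (c : Char) (hO : c ≠ 'O') (hH : c ≠ '#') :
    stepA (arr, os) (j, c) = (arr, os) := by
  simp [stepA, hO, hH]

-- ---- the two writes of an 'O' step ----
lemma write_pair_nilm (u r : List Char) (b : Nat) :
    PySem.List.pySetD (PySem.List.pySetD (u ++ (List.replicate b 'O' ++ ('O' :: r)))
        ((u.length + b : Nat) : Int) '.') ((u.length + b : Nat) : Int) 'O'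
      = u ++ (List.replicate (b + 1) 'O' ++ r) := by
  rw [PySem.List.pySetD_natCast, PySem.List.pySetD_natCast]
  rw [show u ++ (List.replicate b 'O' ++ ('O' :: r)) = (u ++ List.replicate b 'O') ++ ('O' :: r) from by simp,
      show u.length + b = (u ++ List.replicate b 'O').length from by simp,
      set_at_len, set_at_len]
  simp [List.replicate_succ']

lemma write_pair_consm (u r mt : List Char) (x : Char) (b : Nat) :
    PySem.List.pySetD (PySem.List.pySetD (u ++ (List.replicate b 'O' ++ ((x :: mt) ++ ('O' :: r))))
        ((u.length + b + (mt.length + 1) : Nat) : Int) '.') ((u.length + b : Nat) : Int) 'O'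
      = u ++ (List.replicate (b + 1) 'O' ++ ((mt ++ ['.']) ++ r)) := by
  rw [PySem.List.pySetD_natCast, PySem.List.pySetD_natCast]
  rw [show u ++ (List.replicate b 'O' ++ ((x :: mt) ++ ('O' :: r)))
        = (u ++ (List.replicate b 'O' ++ (x :: mt))) ++ ('O' :: r) from by simp,
      show u.length + b + (mt.length + 1) = (u ++ (List.replicate b 'O' ++ (x :: mt))).length from by
        simp
        try omega,
      set_at_len]
  rw [show (u ++ (List.replicate b 'O' ++ (x :: mt))) ++ ('.' :: r)
        = (u ++ List.replicate b 'O') ++ (x :: (mt ++ ('.' :: r))) from by simp,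
      show u.length + b = (u ++ List.replicate b 'O').length from by simp,
      set_at_len]
  simp [List.replicate_succ']

-- ---- splitOn ['#'] characterization ----
lemma splitOn_go_acc (fuel : Nat) : ∀ (l cur : List Char) (acc : List (List Char)),
    PySem.Chars.splitOn.go ['#'] fuel l cur acc
      = acc.reverse ++ PySem.Chars.splitOn.go ['#'] fuel l cur [] := by
  induction fuel with
  | zero => intro l cur acc; simp [PySem.Chars.splitOn.go]
  | succ f ih =>
    intro l cur acc
    cases l with
    | nil => simp [PySem.Chars.splitOn.go]
    | cons c rest =>
      by_cases hc : c = '#'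
      · subst hc
        simp only [PySem.Chars.splitOn.go, isPrefixOf_single_true, if_true,
          List.length_cons, List.length_nil, List.drop_succ_cons, List.drop_zero]
        rw [ih rest [] (cur.reverse :: acc), ih rest [] [cur.reverse]]
        simp
      · simp only [PySem.Chars.splitOn.go, isPrefixOf_single_false '#' c rest hc,
          Bool.false_eq_true, if_false]
        exact ih rest (c :: cur) acc

lemma splitOn_go_no_hash : ∀ (l : List Char) (fuel : Nat) (cur : List Char),
    l.length < fuel → '#' ∉ l →
    PySem.Chars.splitOn.go ['#'] fuel l cur [] = [cur.reverse ++ l] := by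
  intro l
  induction l with
  | nil =>
    intro fuel cur hf _
    cases fuel with
    | zero => omega
    | succ f => simp [PySem.Chars.splitOn.go]
  | cons c rest ih =>
    intro fuel cur hf h
    have hc : c ≠ '#' := by rintro rfl; exact h List.mem_cons_self
    cases fuel with
    | zero => simp at hf
    | succ f =>
      simp only [PySem.Chars.splitOn.go, isPrefixOf_single_false '#' c rest hc,
        Bool.false_eq_true, if_false]
      rw [ih f (c :: cur) (by simpa using Nat.lt_of_succ_lt_succ hf)
        (fun hm => h (List.mem_cons_of_mem _ hm))]
      simp

lemma splitOn_no_hash (cs : List Char) (h : '#' ∉ cs) :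
    PySem.Chars.splitOn cs ['#'] = [cs] := by
  unfold PySem.Chars.splitOn
  rw [splitOn_go_no_hash cs (cs.length + 1) [] (by omega) h]
  simp

lemma splitOn_go_ne_nil (fuel : Nat) : ∀ (l cur : List Char) (acc : List (List Char)),
    PySem.Chars.splitOn.go ['#'] fuel l cur acc ≠ [] := by
  induction fuel with
  | zero => intro l cur acc; simp [PySem.Chars.splitOn.go]
  | succ f ih =>
    intro l cur acc
    cases l with
    | nil => simp [PySem.Chars.splitOn.go]
    | cons c rest =>
      simp only [PySem.Chars.splitOn.go]
      split
      · exact ih _ _ _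
      · exact ih _ _ _

lemma splitOn_ne_nil (cs : List Char) : PySem.Chars.splitOn cs ['#'] ≠ [] := by
  unfold PySem.Chars.splitOn
  exact splitOn_go_ne_nil _ _ _ _

lemma splitOn_go_hash : ∀ (s : List Char) (t cur : List Char) (fuel : Nat),
    (s ++ '#' :: t).length < fuel → '#' ∉ s →
    PySem.Chars.splitOn.go ['#'] fuel (s ++ '#' :: t) cur []
      = (cur.reverse ++ s) :: PySem.Chars.splitOn.go ['#'] (fuel - (s.length + 1)) t [] [] := by
  intro s
  induction s with
  | nil =>
    intro t cur fuel hf _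
    cases fuel with
    | zero => simp at hf
    | succ f =>
      simp only [List.nil_append]
      simp only [PySem.Chars.splitOn.go, isPrefixOf_single_true, if_true,
        List.length_cons, List.length_nil, List.drop_succ_cons, List.drop_zero]
      rw [splitOn_go_acc f t [] [cur.reverse]]
      simp
  | cons c s' ih =>
    intro t cur fuel hf h
    have hc : c ≠ '#' := by rintro rfl; exact h List.mem_cons_self
    cases fuel with
    | zero => simp at hf
    | succ f =>
      simp only [List.cons_append, PySem.Chars.splitOn.go,
        isPrefixOf_single_false '#' c (s' ++ '#' :: t) hc, Bool.false_eq_true, if_false]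
      rw [ih t (c :: cur) f (by simpa using Nat.lt_of_succ_lt_succ hf)
        (fun hm => h (List.mem_cons_of_mem _ hm))]
      have harith : f - (s'.length + 1) = f + 1 - ((c :: s').length + 1) := by
        simp
      rw [harith]
      simp

lemma splitOn_hash (s t : List Char) (h : '#' ∉ s) :
    PySem.Chars.splitOn (s ++ '#' :: t) ['#'] = s :: PySem.Chars.splitOn t ['#'] := by
  unfold PySem.Chars.splitOn
  rw [splitOn_go_hash s t [] ((s ++ '#' :: t).length + 1) (by omega) h]
  have harith : (s ++ '#' :: t).length + 1 - (s.length + 1) = t.length + 1 := by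
    simp
  rw [harith]
  simp

-- ---- count ['O'] / replace / slice on a segment ----
lemma count_go_char (fuel : Nat) : ∀ (l : List Char) (acc : Nat), l.length ≤ fuel →
    PySem.Chars.count.go ['O'] fuel l acc = acc + l.count 'O' := by
  induction fuel with
  | zero =>
    intro l acc hf
    have hl : l = [] := List.length_eq_zero_iff.mp (Nat.le_zero.mp hf)
    subst hl
    simp [PySem.Chars.count.go]
  | succ f ih =>
    intro l acc hf
    cases l with
    | nil => simp [PySem.Chars.count.go]
    | cons c rest =>
      by_cases hc : c = 'O'
      · subst hc
        simp only [PySem.Chars.count.go, isPrefixOf_single_true, if_true,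
          List.length_cons, List.length_nil, List.drop_succ_cons, List.drop_zero]
        rw [ih rest (acc + 1) (by simpa using Nat.le_of_succ_le_succ hf)]
        simp [List.count_cons]
        omega
      · simp only [PySem.Chars.count.go, isPrefixOf_single_false 'O' c rest hc,
          Bool.false_eq_true, if_false]
        rw [ih rest acc (by simpa using Nat.le_of_succ_le_succ hf)]
        simp [List.count_cons, hc]

lemma count_char (l : List Char) : PySem.Chars.count l ['O'] = l.count 'O' := by
  unfold PySem.Chars.count
  simp only [List.isEmpty_cons, Bool.false_eq_true, if_false]
  rw [count_go_char l.length l 0 (le_refl _)]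
  simp

lemma replace_go_char (fuel : Nat) : ∀ (l acc : List Char), l.length ≤ fuel →
    PySem.Chars.replace.go ['O'] ['.'] fuel l acc = acc.reverse ++ l.map pvSub := by
  induction fuel with
  | zero =>
    intro l acc hf
    have hl : l = [] := List.length_eq_zero_iff.mp (Nat.le_zero.mp hf)
    subst hl
    simp [PySem.Chars.replace.go]
  | succ f ih =>
    intro l acc hf
    cases l with
    | nil => simp [PySem.Chars.replace.go]
    | cons c rest =>
      by_cases hc : c = 'O'
      · subst hc
        simp only [PySem.Chars.replace.go, isPrefixOf_single_true, if_true,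
          List.length_cons, List.length_nil, List.drop_succ_cons, List.drop_zero,
          List.reverse_singleton, List.singleton_append]
        rw [ih rest ('.' :: acc) (by simpa using Nat.le_of_succ_le_succ hf)]
        simp [pvSub]
      · simp only [PySem.Chars.replace.go, isPrefixOf_single_false 'O' c rest hc,
          Bool.false_eq_true, if_false]
        rw [ih rest (c :: acc) (by simpa using Nat.le_of_succ_le_succ hf)]
        simp [pvSub, hc]

lemma replace_char (l : List Char) :
    PySem.Chars.replace l ['O'] ['.'] = l.map pvSub := by
  unfold PySem.Chars.replace
  simp only [List.isEmpty_cons, Bool.false_eq_true, if_false]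
  rw [replace_go_char l.length l [] (le_refl _)]
  simp

lemma segout_eq (seg : List Char) :
    List.replicate (PySem.Chars.count seg ['O']) 'O' ++
        PySem.Chars.replace (PySem.Chars.slice seg (some ((PySem.Chars.count seg ['O'] : Nat) : Int)) none) ['O'] ['.']
      = pvSegOut seg := by
  rw [count_char]
  have hs : PySem.Chars.slice seg (some ((seg.count 'O' : Nat) : Int)) none
      = seg.drop (seg.count 'O') := by
    rw [PySem.Chars.slice_eq_listSlice, PySem.List.slice_from seg (by positivity)]
    simp
  rw [hs, replace_char]
  rfl

-- ---- pvRow recursion ----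
lemma pvRow_no_hash (cs : List Char) (h : '#' ∉ cs) : pvRow cs = pvSegOut cs := by
  unfold pvRow
  rw [splitOn_no_hash cs h]
  simp [PySem.Chars.join_singleton]

lemma pvRow_hash (s t : List Char) (h : '#' ∉ s) :
    pvRow (s ++ '#' :: t) = pvSegOut s ++ '#' :: pvRow t := by
  unfold pvRow
  rw [splitOn_hash s t h]
  obtain ⟨a, r, hsp⟩ := List.exists_cons_of_ne_nil (splitOn_ne_nil t)
  rw [hsp]
  simp [PySem.Chars.join_cons_cons]

-- ---- pvG facts ----
lemma pvG_closed (s : List Char) : ∀ m : List Char,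
    pvG m s = List.replicate (s.count 'O') 'O' ++ (m ++ s.map pvSub).drop (s.count 'O') := by
  induction s with
  | nil => intro m; simp [pvG]
  | cons c s' ih =>
    intro m
    by_cases hc : c = 'O'
    · subst hc
      cases m with
      | nil =>
        rw [show pvG [] ('O' :: s') = 'O' :: pvG [] s' from by simp [pvG]]
        rw [ih []]
        simp [List.count_cons, List.replicate_succ, pvSub]
      | cons x mt =>
        rw [show pvG (x :: mt) ('O' :: s') = 'O' :: pvG (mt ++ ['.']) s' from by simp [pvG]]
        rw [ih (mt ++ ['.'])]
        simp [List.count_cons, List.replicate_succ, pvSub, List.append_assoc]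
    · rw [show pvG m (c :: s') = pvG (m ++ [c]) s' from by simp [pvG, hc]]
      rw [ih (m ++ [c])]
      have hcs : pvSub c = c := by simp [pvSub, hc]
      simp [List.count_cons, hc, hcs, List.append_assoc]

lemma pvG_nil_eq_segOut (s : List Char) : pvG [] s = pvSegOut s := by
  rw [pvG_closed s []]
  unfold pvSegOut
  simp [List.map_drop]

lemma length_pvSegOut (s : List Char) : (pvSegOut s).length = s.length := by
  have h := List.count_le_length (l := s) (a := 'O')
  simp [pvSegOut]
  omega

-- ---- A's fold over one '#'-free segment ----
lemma foldSeg (s : List Char) : ∀ (b : Nat) (m : List Char), '#' ∉ s → 'O' ∉ m →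
    ∀ (u rest : List Char),
    (PySem.List.enumerate s ((u.length + b + m.length : Nat) : Int)).foldl stepA
        (u ++ (List.replicate b 'O' ++ (m ++ (s ++ rest))), ((u.length + b : Nat) : Int))
      = (u ++ (List.replicate b 'O' ++ (pvG m s ++ rest)),
         ((u.length + b + s.count 'O' : Nat) : Int)) := by
  induction s with
  | nil =>
    intro b m _ _ u rest
    simp [PySem.List.enumerate_nil, pvG]
  | cons c s' ih =>
    intro b m hs hm u rest
    have hc : c ≠ '#' := by rintro rfl; exact hs List.mem_cons_self
    have hs' : '#' ∉ s' := fun h => hs (List.mem_cons_of_mem _ h)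
    rw [PySem.List.enumerate_cons, List.foldl_cons]
    simp only [List.cons_append]
    by_cases hO : c = 'O'
    · subst hO
      cases m with
      | nil =>
        simp only [List.length_nil, Nat.add_zero, List.nil_append]
        rw [stepA_O, write_pair_nilm u (s' ++ rest) b]
        have est : ((u.length + b : Nat) : Int) + 1 = ((u.length + (b + 1) : Nat) : Int) := by
          push_cast
          omega
        rw [est]
        have IH := ih (b + 1) [] hs' (by simp) u rest
        simp only [List.length_nil, Nat.add_zero, List.nil_append] at IH
        rw [IH]
        rw [show pvG [] ('O' :: s') = 'O' :: pvG [] s' from by simp [pvG]]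
        simp [List.replicate_succ', List.count_cons, Prod.ext_iff]
        all_goals omega
      | cons x mt =>
        simp only [List.length_cons]
        rw [stepA_O, write_pair_consm u (s' ++ rest) mt x b]
        have est : ((u.length + b + (mt.length + 1) : Nat) : Int) + 1
            = ((u.length + (b + 1) + (mt ++ ['.']).length : Nat) : Int) := by
          push_cast [List.length_append, List.length_cons, List.length_nil]
          omega
        have est2 : ((u.length + b : Nat) : Int) + 1 = ((u.length + (b + 1) : Nat) : Int) := by
          push_cast
          omega
        rw [est, est2]
        have hm' : 'O' ∉ mt ++ ['.'] := by
          intro hmem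
          rcases List.mem_append.mp hmem with h1 | h2
          · exact hm (List.mem_cons_of_mem _ h1)
          · simp at h2
        have IH := ih (b + 1) (mt ++ ['.']) hs' hm' u rest
        rw [IH]
        rw [show pvG (x :: mt) ('O' :: s') = 'O' :: pvG (mt ++ ['.']) s' from by simp [pvG]]
        simp [List.replicate_succ', List.count_cons, Prod.ext_iff, List.length_append]
        all_goals omega
    · rw [stepA_other _ _ _ c hO hc]
      have est : ((u.length + b + m.length : Nat) : Int) + 1
          = ((u.length + b + (m ++ [c]).length : Nat) : Int) := by
        push_cast [List.length_append, List.length_cons, List.length_nil]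
        omega
      rw [est]
      have hm' : 'O' ∉ m ++ [c] := by
        intro hmem
        rcases List.mem_append.mp hmem with h1 | h2
        · exact hm h1
        · simp at h2
          exact hO h2.symm
      have IH := ih b (m ++ [c]) hs' hm' u rest
      simp only [List.append_assoc, List.singleton_append] at IH
      rw [IH]
      rw [show pvG m (c :: s') = pvG (m ++ [c]) s' from by simp [pvG, hO]]
      simp [Prod.ext_iff, List.count_cons, hO, List.length_append]
      all_goals omega

-- ---- A's fold over a whole row ----
lemma rowFold_nohash (cs u : List Char) (h : '#' ∉ cs) :
    ((PySem.List.enumerate cs ((u.length : Nat) : Int)).foldl stepA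
        (u ++ cs, ((u.length : Nat) : Int))).1 = u ++ pvRow cs := by
  have H := foldSeg cs 0 [] h (by simp) u []
  simp only [List.length_nil, Nat.add_zero, List.nil_append, List.append_nil,
    List.replicate_zero] at H
  rw [H]
  simp [pvRow_no_hash cs h, pvG_nil_eq_segOut]

lemma dropWhile_first {α : Type} (p : α → Bool) (l : List α) :
    l.dropWhile p = [] ∨ ∃ c t, l.dropWhile p = c :: t ∧ p c = false := by
  induction l with
  | nil => left; rfl
  | cons a l ih =>
    rw [List.dropWhile_cons]
    by_cases h : p a
    · simpa [h] using ih
    · right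
      exact ⟨a, l, by simp [h], by simp [h]⟩

theorem rowFold (cs u : List Char) :
    ((PySem.List.enumerate cs ((u.length : Nat) : Int)).foldl stepA
        (u ++ cs, ((u.length : Nat) : Int))).1 = u ++ pvRow cs := by
  suffices H : ∀ (n : Nat) (cs u : List Char), cs.length ≤ n →
      ((PySem.List.enumerate cs ((u.length : Nat) : Int)).foldl stepA
        (u ++ cs, ((u.length : Nat) : Int))).1 = u ++ pvRow cs from H cs.length cs u le_rfl
  intro n
  induction n with
  | zero =>
    intro cs u hn
    have hcs : cs = [] := List.length_eq_zero_iff.mp (Nat.le_zero.mp hn)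
    subst hcs
    exact rowFold_nohash [] u (by simp)
  | succ n ih =>
    intro cs u hn
    rcases dropWhile_first (fun c => !(c == '#')) cs with hd | ⟨c, t, hd, hcp⟩
    · apply rowFold_nohash
      intro hmem
      have htd := List.takeWhile_append_dropWhile (p := fun c => !(c == '#')) (l := cs)
      rw [hd, List.append_nil] at htd
      rw [← htd] at hmem
      have := List.mem_takeWhile_imp hmem
      simp at this
    · have hch : c = '#' := by simpa using hcp
      subst hch
      have hcs : cs = cs.takeWhile (fun c => !(c == '#')) ++ '#' :: t := by
        conv_lhs => rw [← List.takeWhile_append_dropWhile (p := fun c => !(c == '#')) (l := cs)]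
        rw [hd]
      set s := cs.takeWhile (fun c => !(c == '#')) with hsdef
      have hsh : '#' ∉ s := by
        intro hmem
        have := List.mem_takeWhile_imp hmem
        simp at this
      have hlen : cs.length = s.length + (t.length + 1) := by
        rw [hcs]
        simp
      have hlt : t.length ≤ n := by omega
      rw [hcs, PySem.List.enumerate_append, List.foldl_append]
      have hseg := foldSeg s 0 [] hsh (by simp) u ('#' :: t)
      simp only [List.length_nil, Nat.add_zero, List.nil_append, List.replicate_zero] at hseg
      rw [hseg]
      rw [PySem.List.enumerate_cons, List.foldl_cons, stepA_hash]
      have harr : u ++ (pvG [] s ++ '#' :: t) = (u ++ (pvSegOut s ++ ['#'])) ++ t := by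
        rw [pvG_nil_eq_segOut]
        simp
      have hidx : ((u.length : Nat) : Int) + (s.length : Int) + 1
          = (((u ++ (pvSegOut s ++ ['#'])).length : Nat) : Int) := by
        push_cast [List.length_append, List.length_cons, List.length_nil, length_pvSegOut]
        omega
      rw [harr, hidx]
      rw [ih t (u ++ (pvSegOut s ++ ['#'])) hlt]
      rw [pvRow_hash s t hsh]
      simp

-- ===== VERDICT (by name: the statement is the Claim_ definition above) =====
theorem tilt_west_spec : Claim_equal_tilt_west := by
  intro puzzle _
  unfold Spec_tilt_west
  simp only [tilt_west, tilt_west_alt, List.map_map]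
  apply List.map_congr_left
  intro line _
  simp only [Function.comp]
  have h := rowFold line.toList []
  simp only [List.length_nil, Nat.cast_zero, List.nil_append] at h
  rw [h, PySem.Chars.join_nil_singletons]
  have hseg : ((PySem.Chars.splitOn line.toList ['#']).map (fun seg =>
      List.replicate (PySem.Chars.count seg ['O']) 'O' ++
        PySem.Chars.replace (PySem.Chars.slice seg (some ((PySem.Chars.count seg ['O'] : Nat) : Int)) none) ['O'] ['.']))
      = (PySem.Chars.splitOn line.toList ['#']).map pvSegOut := by
    apply List.map_congr_left
    intro seg _
    exact segout_eq seg
  rw [hseg]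
  rfl
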